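-- pv_equiv track=rewrite | github.com/victordev018/Algoritmos | beecrowd/INICIANTE/1024_criptografia.py | deslocar_uma_posicoes_esquerda
-- ===== SOURCE A (Python) =====
-- def deslocar_uma_posicoes_esquerda(texto:str):
--     # pega o indice de partida (metade da string)
--     indice_caractere_de_partida = int(indice_segunda_metade_string(texto))
--     nova_string = ""
--
--     for index in range(len(texto)):
--         # verifica se ja chegou na metade da string
--         if index + 1 >= indice_caractere_de_partida:
--             # pega a letra atual
--             letra_atual = texto[index]
--             # obtem o codigo ascii da nova letra, deslocando -1 para esquerda em relação a letra atual
--             codigo_nova_letra = deslocar_posicao_letra(letra_atual, -1)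
--             # adiciona na string o caractere desta nova letra
--             nova_string += chr(codigo_nova_letra)
--             # interrompe este loop atual, ja que a letra ja foi adicionada
--             continue
--         letra_atual = texto[index]
--         nova_string += letra_atual
--
--     return nova_string
--
-- def indice_segunda_metade_string(texto:str):
--     eh_par = len(texto) % 2 == 0
--     if eh_par:
--         return len(texto) / 2 + 1
--
--     return len(texto) / 2 + 0.5
--
-- def deslocar_posicao_letra(caractere:str, fator:int):
--     return ord(caractere) + fator
-- ===== SOURCE B (Python) =====
-- def deslocar_uma_posicoes_esquerda(texto: str):
--     mid = len(texto) // 2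
--     return texto[:mid] + ''.join(chr(ord(c) - 1) for c in texto[mid:])
-- ===== Notes on version B (the rewrite author's own statement) =====
-- stated objective: simpler
-- what changed: Replaces the index loop with its per-character boundary check and the float-based half-index helpers by a direct mid = len(texto)//2 split: first half kept verbatim, second half mapped through chr(ord(c)-1) via slice + join.
import Mathlib
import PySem

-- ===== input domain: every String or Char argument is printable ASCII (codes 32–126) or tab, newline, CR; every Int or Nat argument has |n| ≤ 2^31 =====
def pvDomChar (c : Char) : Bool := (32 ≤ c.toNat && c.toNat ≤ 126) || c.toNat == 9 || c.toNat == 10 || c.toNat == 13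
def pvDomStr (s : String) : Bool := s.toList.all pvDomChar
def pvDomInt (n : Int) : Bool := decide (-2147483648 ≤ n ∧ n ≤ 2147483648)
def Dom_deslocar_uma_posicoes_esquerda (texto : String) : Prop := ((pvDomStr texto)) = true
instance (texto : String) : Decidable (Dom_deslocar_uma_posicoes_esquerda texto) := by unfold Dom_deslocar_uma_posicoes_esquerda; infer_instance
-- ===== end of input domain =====

-- B inlines the float half-index helpers into mid = len // 2 and replaces the
-- per-index boundary-checked loop by two slices and a map (objective: simpler).

-- ===== PORT A =====
-- indice_segunda_metade_string: the Python float arithmetic (len/2 + 1 resp. len/2 + 0.5,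
-- truncated by int()) is exact for every length reachable in Dom, so we port the
-- integer values it yields: even -> n/2 + 1, odd -> (n+1)/2.
def indice_segunda_metade_string (n : Nat) : Nat :=
  if n % 2 == 0 then n / 2 + 1 else (n + 1) / 2

-- deslocar_posicao_letra(c, -1) = ord(c) - 1; chr of it.  On Dom every char code is ≥ 9,
-- so Nat subtraction agrees with Python's ord(c) - 1 here.
def deslocar_posicao_letra (c : Char) : Nat := c.toNat - 1

def deslocar_uma_posicoes_esquerda (texto : String) : String :=
  let cs := texto.toList
  let indice := indice_segunda_metade_string cs.length
  -- for index in range(len(texto)): build nova_string by +=; texto[index] is always in range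
  let nova := (List.range cs.length).foldl (fun acc index =>
    if index + 1 ≥ indice then
      acc ++ [Char.ofNat (deslocar_posicao_letra cs[index]!)]
    else
      acc ++ [cs[index]!]) []
  String.mk nova

-- ===== PORT B =====
def deslocar_uma_posicoes_esquerda_alt (texto : String) : String :=
  let cs := texto.toList
  let mid := cs.length / 2
  String.mk (cs.take mid ++ (cs.drop mid).map (fun c => Char.ofNat (c.toNat - 1)))

-- ===== PRECONDITION & SPEC =====
def Spec_deslocar_uma_posicoes_esquerda (texto : String) (out : String) : Prop := out = deslocar_uma_posicoes_esquerda_alt texto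
instance (texto : String) (out : String) : Decidable (Spec_deslocar_uma_posicoes_esquerda texto out) := by unfold Spec_deslocar_uma_posicoes_esquerda; infer_instance

-- ===== CLAIM (what is proved, stated in full; the proofs are below) =====
def Claim_equal_deslocar_uma_posicoes_esquerda : Prop := ∀ (texto : String), Dom_deslocar_uma_posicoes_esquerda texto → Spec_deslocar_uma_posicoes_esquerda texto (deslocar_uma_posicoes_esquerda texto)

-- ===== LEMMAS AND PROOFS =====

-- A's fold appends one character per index: it is the map of its branch body over range n.
theorem foldl_if_append (p : Nat → Prop) [DecidablePred p] (f g : Nat → Char) (l : List Nat) (a : List Char) :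
    l.foldl (fun acc i => if p i then acc ++ [f i] else acc ++ [g i]) a
      = a ++ l.map (fun i => if p i then f i else g i) := by
  induction l generalizing a with
  | nil => simp
  | cons x xs ih => by_cases h : p x <;> simp [List.foldl, h, ih]

-- A's boundary test 'index + 1 ≥ indice_segunda_metade_string n' is exactly 'n / 2 ≤ index'.
theorem indice_eq_mid (n index : Nat) :
    (index + 1 ≥ indice_segunda_metade_string n) ↔ (n / 2 ≤ index) := by
  unfold indice_segunda_metade_string
  rcases Nat.even_or_odd n with h | h
  · have h0 : n % 2 = 0 := Nat.even_iff.mp h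
    simp [h0]
  · have h2 : n % 2 = 1 := Nat.odd_iff.mp h
    rw [if_neg (by simp [h2])]
    omega

-- The mapped range equals take ++ shifted drop.
theorem range_map_split (cs : List Char) :
    (List.range cs.length).map
      (fun index => if index + 1 ≥ indice_segunda_metade_string cs.length
        then Char.ofNat (deslocar_posicao_letra cs[index]!)
        else cs[index]!)
    = cs.take (cs.length / 2) ++ (cs.drop (cs.length / 2)).map (fun c => Char.ofNat (c.toNat - 1)) := by
  apply List.ext_getElem
  · simp; omega
  · intro i h1 h2
    have hi : i < cs.length := by simpa using h1
    by_cases hmid : cs.length / 2 ≤ i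
    · have hb : (i + 1 ≥ indice_segunda_metade_string cs.length) := (indice_eq_mid _ _).mpr hmid
      simp only [List.getElem_map, List.getElem_range, if_pos hb]
      rw [List.getElem_append_right (by simp; omega)]
      simp only [List.length_take, List.getElem_map, List.getElem_drop]
      have hmin : min (cs.length / 2) cs.length = cs.length / 2 := Nat.min_eq_left (Nat.div_le_self _ _)
      simp only [hmin, Nat.add_sub_cancel' hmid]
      simp [deslocar_posicao_letra, List.getElem!_eq_getElem?_getD, List.getElem?_eq_getElem hi]
    · have : ¬ (i + 1 ≥ indice_segunda_metade_string cs.length) := fun h => hmid ((indice_eq_mid _ _).mp h)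
      simp only [List.getElem_map, List.getElem_range, if_neg this]
      rw [List.getElem_append_left (by simp; omega)]
      simp [List.getElem!_eq_getElem?_getD, List.getElem?_eq_getElem hi]

-- ===== VERDICT (by name: the statement is the Claim_ definition above) =====
theorem deslocar_uma_posicoes_esquerda_spec : Claim_equal_deslocar_uma_posicoes_esquerda := by
  intro texto _
  unfold Spec_deslocar_uma_posicoes_esquerda
  unfold deslocar_uma_posicoes_esquerda deslocar_uma_posicoes_esquerda_alt
  simp only []
  rw [foldl_if_append (fun index => index + 1 ≥ indice_segunda_metade_string texto.toList.length)
        (fun index => Char.ofNat (deslocar_posicao_letra texto.toList[index]!))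
        (fun index => texto.toList[index]!), List.nil_append]
  exact congrArg String.mk (range_map_split texto.toList)
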